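-- pv_equiv track=rewrite | github.com/pypi-data/pypi-mirror-391 | packages/pylelemmatize/pylelemmatize-0.1.1.tar.gz/pylelemmatize-0.1.1/src/pylelemmatize/xml_util.py | _scan_tag_end
-- ===== SOURCE A (Python) =====
-- def _scan_tag_end(s: str, start: int) -> int:
--     """
--     Starting at '<', find the index just after the matching '>' while
--     respecting quoted strings.
--     """
--     assert s[start] == '<'
--     i = start + 1
--     n = len(s)
--     quote = None
--     while i < n:
--         c = s[i]
--         if quote:
--             if c == quote:
--                 quote = None
--         else:
--             if c == '"' or c == "'":
--                 quote = c
--             elif c == '>':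
--                 return i + 1
--         i += 1
--     return n  # fallback (malformed: no closing '>')
-- ===== SOURCE B (Python) =====
-- def _scan_tag_end(s: str, start: int) -> int:
--     """Find the index just after the '>' closing the tag at `start`,
--     skipping over quoted attribute values, by jumping between the next
--     interesting characters with str.find instead of walking char by char."""
--     assert s[start] == '<'
--     i = start + 1
--     while True:
--         gt = s.find('>', i)
--         if gt == -1:
--             return len(s)
--         q = -1
--         for p in (s.find('"', i), s.find("'", i)):
--             if p != -1 and p < gt and (q == -1 or p < q):
--                 q = p
--         if q == -1:
--             return gt + 1
--         close = s.find(s[q], q + 1)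
--         if close == -1:
--             return len(s)
--         i = close + 1
-- ===== Notes on version B (the rewrite author's own statement) =====
-- stated objective: alternative
-- what changed: Replaces A's character-by-character loop with an explicit quote-state variable by a jump-based scan that uses str.find to locate the next '>' and the next quote character and skips whole quoted spans at once, with no per-character state machine.
-- outside the precondition, e.g. on _scan_tag_end('<a>', -3): A returns 0, B returns 3
import Mathlib
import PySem

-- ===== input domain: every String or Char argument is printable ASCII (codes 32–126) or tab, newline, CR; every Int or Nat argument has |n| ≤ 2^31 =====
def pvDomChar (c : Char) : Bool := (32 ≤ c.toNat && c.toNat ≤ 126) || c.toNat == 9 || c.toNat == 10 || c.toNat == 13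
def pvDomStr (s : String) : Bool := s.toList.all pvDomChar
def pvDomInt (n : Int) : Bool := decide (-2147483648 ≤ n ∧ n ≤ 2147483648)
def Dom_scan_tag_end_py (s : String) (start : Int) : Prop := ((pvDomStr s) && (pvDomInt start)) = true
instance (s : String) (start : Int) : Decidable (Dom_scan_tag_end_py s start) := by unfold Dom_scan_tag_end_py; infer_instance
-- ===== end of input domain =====

-- B replaces A's character-by-character quote-state loop by str.find jumps between the
-- next '>' / quote characters (objective: alternative decomposition; same asymptotic cost).

-- ===== PORT A =====
-- A's while-loop over the Int index i with the `quote` state variable; s[i] is Python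
-- indexing (negative i wraps), so pyGetD is exact on every i the loop can reach from a
-- start at which the assert passed (|i| ≤ len(s)); the default ' ' is never read there.
def scanALoopI (cs : List Char) (i : Int) (quote : Option Char) : Int :=
  if i < (cs.length : Int) then
    match quote with
    | some q => scanALoopI cs (i + 1) (if PySem.List.pyGetD cs i ' ' = q then none else some q)
    | none =>
      if PySem.List.pyGetD cs i ' ' = '"' ∨ PySem.List.pyGetD cs i ' ' = '\'' then
        scanALoopI cs (i + 1) (some (PySem.List.pyGetD cs i ' '))
      else if PySem.List.pyGetD cs i ' ' = '>' then i + 1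
      else scanALoopI cs (i + 1) none
  else (cs.length : Int)
  termination_by ((cs.length : Int) - i).toNat
  decreasing_by all_goals omega

def scan_tag_end_py (s : String) (start : Int) : Int :=
  scanALoopI s.toList (start + 1) none

-- ===== PORT B =====
-- B's `while True` loop; the fuel argument only makes the recursion total (each real
-- iteration moves i past a closed quote, so cs.length + 1 steps are never exhausted).
def scanBLoop (cs : List Char) (fuel : Nat) (i : Int) : Int :=
  match fuel with
  | 0 => (cs.length : Int)
  | fuel + 1 =>
    let gt := PySem.Chars.findFrom cs ['>'] i
    if gt = -1 then (cs.length : Int)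
    else
      let dq := PySem.Chars.findFrom cs ['"'] i
      let sq := PySem.Chars.findFrom cs ['\''] i
      let q := [dq, sq].foldl (fun q p => if p ≠ -1 ∧ p < gt ∧ (q = -1 ∨ p < q) then p else q) (-1 : Int)
      if q = -1 then gt + 1
      else
        -- s[q]: q is a valid non-negative index here, so the default is never used
        let qc := PySem.List.pyGetD cs q ' '
        let close := PySem.Chars.findFrom cs [qc] (q + 1)
        if close = -1 then (cs.length : Int)
        else scanBLoop cs fuel (close + 1)

def scan_tag_end_py_alt (s : String) (start : Int) : Int :=
  scanBLoop s.toList (s.toList.length + 1) (start + 1)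

-- ===== PRECONDITION & SPEC =====
-- Pre_ excludes start < 0 although A also returns there: Python's negative-index
-- wraparound makes A rescan earlier characters mid-loop and return accidental values
-- (even non-indices like 0 or -2) that no caller would specify; B's find-based scan
-- clamps negative offsets and returns a different value there.  It also excludes the
-- inputs where A's `assert s[start] == '<'` raises (index out of range / not a '<').
def Pre_scan_tag_end_py (s : String) (start : Int) : Prop :=
  0 ≤ start ∧ PySem.Str.pyGet? s start = some '<'
instance (s : String) (start : Int) : Decidable (Pre_scan_tag_end_py s start) := by
  unfold Pre_scan_tag_end_py; infer_instance

def pvWitness_scan_tag_end_py : String × Int := ("<a href=\"x>y\">z", 0)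

def Spec_scan_tag_end_py (s : String) (start : Int) (out : Int) : Prop := out = scan_tag_end_py_alt s start
instance (s : String) (start : Int) (out : Int) : Decidable (Spec_scan_tag_end_py s start out) := by unfold Spec_scan_tag_end_py; infer_instance

-- ===== CLAIM (what is proved, stated in full; the proofs are below) =====
def Claim_equal_scan_tag_end_py : Prop := ∀ (s : String) (start : Int), Dom_scan_tag_end_py s start → Pre_scan_tag_end_py s start → Spec_scan_tag_end_py s start (scan_tag_end_py s start)

-- ===== LEMMAS AND PROOFS =====

-- proof-side Nat-indexed copy of A's loop (equal to scanALoopI on non-negative indices)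
def scanALoop (cs : List Char) (i : Nat) (quote : Option Char) : Int :=
  if h : i < cs.length then
    match quote with
    | some q => scanALoop cs (i + 1) (if cs[i] = q then none else some q)
    | none =>
      if cs[i] = '"' ∨ cs[i] = '\'' then scanALoop cs (i + 1) (some cs[i])
      else if cs[i] = '>' then (i : Int) + 1
      else scanALoop cs (i + 1) none
  else (cs.length : Int)
  termination_by cs.length - i

lemma scanALoopI_eq {cs : List Char} : ∀ d (i : Nat) (quote : Option Char),
    cs.length - i = d → scanALoopI cs (i : Int) quote = scanALoop cs i quote := by
  intro d
  induction d with
  | zero =>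
    intro i quote hd
    rw [scanALoopI.eq_def, scanALoop]
    simp [show ¬ ((i : Int) < (cs.length : Int)) by omega, show ¬ i < cs.length by omega]
  | succ d ih =>
    intro i quote hd
    have hi : i < cs.length := by omega
    have hg : PySem.List.pyGetD cs (i : Int) ' ' = cs[i] :=
      PySem.List.pyGetD_eq_getElem cs ' ' (by omega) (by omega)
    have hstep : ((i : Int) + 1) = (((i + 1 : Nat) : Nat) : Int) := by push_cast; ring
    rw [scanALoopI.eq_def, scanALoop]
    simp only [show ((i : Int) < (cs.length : Int)) by omega, if_true, dif_pos hi, hg, hstep]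
    match quote with
    | some q =>
      simp only []
      rw [ih (i + 1) _ (by omega)]
    | none =>
      simp only []
      split
      · rw [ih (i + 1) _ (by omega)]
      · split
        · push_cast; ring
        · rw [ih (i + 1) _ (by omega)]

-- single-character prefix/infix of a drop, in terms of getElem?
lemma one_prefix_drop (cs : List Char) (c : Char) (j : Nat) :
    [c] <+: cs.drop j ↔ cs[j]? = some c := by
  constructor
  · rintro ⟨t, ht⟩
    have : (cs.drop j).head? = some c := by rw [← ht]; rfl
    simpa [List.head?_drop] using this
  · intro h
    have : (cs.drop j).head? = some c := by simpa [List.head?_drop] using h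
    rcases List.head?_eq_some_iff.mp this with ⟨t, ht⟩
    exact ⟨t, by rw [ht]; rfl⟩

lemma one_infix_drop (cs : List Char) (c : Char) (k : Nat) :
    [c] <:+: cs.drop k ↔ ∃ j, k ≤ j ∧ cs[j]? = some c := by
  rw [List.singleton_infix_iff]
  constructor
  · intro h
    rcases List.mem_iff_getElem.mp h with ⟨m, hm, he⟩
    have hm' : k + m < cs.length := by
      have := List.length_drop (l := cs) (i := k); omega
    refine ⟨k + m, by omega, ?_⟩
    rw [List.getElem?_eq_getElem hm']
    rw [List.getElem_drop] at he
    exact congrArg some he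
  · rintro ⟨j, hkj, hj⟩
    have hjl : j < cs.length := (List.getElem?_eq_some_iff.mp hj).1
    have hv : cs[j] = c := by
      have := List.getElem?_eq_getElem hjl (l := cs)
      rw [this] at hj; exact Option.some.inj hj
    have : (cs.drop k)[j - k]'(by simp; omega) = c := by
      rw [List.getElem_drop]
      have hjk : k + (j - k) = j := by omega
      simp_rw [hjk]; exact hv
    exact this ▸ List.getElem_mem _

-- findFrom with a single-character needle: failure and success characterisations
lemma findChar_neg {cs : List Char} {c : Char} {k : Nat} (hk : k ≤ cs.length)
    (h : PySem.Chars.findFrom cs [c] (k : Int) = -1) :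
    ∀ j, k ≤ j → cs[j]? ≠ some c := by
  have h2 := (PySem.Chars.findFrom_natCast_eq_neg_one_iff cs [c] k hk).mp h
  rw [one_infix_drop] at h2
  intro j hkj hj
  exact h2 ⟨j, hkj, hj⟩

lemma findChar_spec {cs : List Char} {c : Char} {k : Nat} (hk : k ≤ cs.length)
    (h : PySem.Chars.findFrom cs [c] (k : Int) ≠ -1) :
    (k : Int) ≤ PySem.Chars.findFrom cs [c] (k : Int) ∧
    cs[(PySem.Chars.findFrom cs [c] (k : Int)).toNat]? = some c ∧
    ∀ j, k ≤ j → j < (PySem.Chars.findFrom cs [c] (k : Int)).toNat → cs[j]? ≠ some c := by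
  obtain ⟨h1, h2, h3⟩ := PySem.Chars.findFrom_natCast_spec cs [c] k hk h
  refine ⟨h1, (one_prefix_drop _ _ _).mp h2, fun j hj1 hj2 hj3 => ?_⟩
  exact h3 j hj1 hj2 ((one_prefix_drop _ _ _).mpr hj3)

-- A's loop past the end returns len
lemma scanA_ge {cs : List Char} {i : Nat} (h : cs.length ≤ i) (quote : Option Char) :
    scanALoop cs i quote = cs.length := by
  rw [scanALoop]; simp [show ¬ i < cs.length by omega]

-- no '>' from i on: A's loop falls through and returns len (any quote state)
lemma scanA_noGT {cs : List Char} : ∀ d i, cs.length - i = d →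
    (∀ j, i ≤ j → cs[j]? ≠ some '>') → ∀ quote, scanALoop cs i quote = cs.length := by
  intro d
  induction d with
  | zero => intro i hd _ quote; exact scanA_ge (by omega) quote
  | succ d ih =>
    intro i hd hno quote
    have hi : i < cs.length := by omega
    have hnext : ∀ j, i + 1 ≤ j → cs[j]? ≠ some '>' := fun j hj => hno j (by omega)
    have hii : cs[i]? = some cs[i] := List.getElem?_eq_getElem hi
    have hgt : cs[i] ≠ '>' := fun he => hno i le_rfl (he ▸ hii)
    rw [scanALoop]
    match quote with
    | some q => simp only [dif_pos hi]; exact ih (i + 1) (by omega) hnext _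
    | none =>
      simp only [dif_pos hi]
      by_cases hqq : cs[i] = '"' ∨ cs[i] = '\''
      · rw [if_pos hqq]; exact ih (i + 1) (by omega) hnext _
      · rw [if_neg hqq, if_neg hgt]; exact ih (i + 1) (by omega) hnext _

-- inside a quote with no closing quote char from i on: returns len
lemma scanA_quote_noclose {cs : List Char} {q : Char} : ∀ d i, cs.length - i = d →
    (∀ j, i ≤ j → cs[j]? ≠ some q) → scanALoop cs i (some q) = cs.length := by
  intro d
  induction d with
  | zero => intro i hd _; exact scanA_ge (by omega) _
  | succ d ih =>
    intro i hd hno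
    have hi : i < cs.length := by omega
    have hii : cs[i]? = some cs[i] := List.getElem?_eq_getElem hi
    have hne : cs[i] ≠ q := fun he => hno i le_rfl (he ▸ hii)
    rw [scanALoop]
    simp only [dif_pos hi, if_neg hne]
    exact ih (i + 1) (by omega) (fun j hj => hno j (by omega))

-- inside a quote, skip to just after the first closing quote char
lemma scanA_quote_skip {cs : List Char} {q : Char} : ∀ d i j, j - i = d → i ≤ j →
    cs[j]? = some q → (∀ k, i ≤ k → k < j → cs[k]? ≠ some q) →
    scanALoop cs i (some q) = scanALoop cs (j + 1) none := by
  intro d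
  induction d with
  | zero =>
    intro i j hd hij hj _
    have hij' : i = j := by omega
    subst hij'
    have hi : i < cs.length := (List.getElem?_eq_some_iff.mp hj).1
    have hv : cs[i] = q := by
      rw [List.getElem?_eq_getElem hi] at hj; exact Option.some.inj hj
    rw [scanALoop]
    simp [dif_pos hi, hv]
  | succ d ih =>
    intro i j hd hij hj hb
    have hjl : j < cs.length := (List.getElem?_eq_some_iff.mp hj).1
    have hi : i < cs.length := by omega
    have hii : cs[i]? = some cs[i] := List.getElem?_eq_getElem hi
    have hne : cs[i] ≠ q := fun he => hb i le_rfl (by omega) (he ▸ hii)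
    rw [scanALoop]
    simp only [dif_pos hi, if_neg hne]
    exact ih (i + 1) j (by omega) (by omega) hj (fun k hk1 hk2 => hb k (by omega) hk2)

-- outside a quote, skip over characters that are none of '>' '"' '\''
lemma scanA_skip {cs : List Char} : ∀ d i j, j - i = d → i ≤ j →
    (∀ k, i ≤ k → k < j → cs[k]? ≠ some '>' ∧ cs[k]? ≠ some '"' ∧ cs[k]? ≠ some '\'') →
    scanALoop cs i none = scanALoop cs j none := by
  intro d
  induction d with
  | zero =>
    intro i j hd hij _
    have h : i = j := by omega
    subst h; rfl
  | succ d ih =>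
    intro i j hd hij hb
    by_cases hi : i < cs.length
    · have hii : cs[i]? = some cs[i] := List.getElem?_eq_getElem hi
      obtain ⟨h1, h2, h3⟩ := hb i le_rfl (by omega)
      have c1 : cs[i] ≠ '>' := fun he => h1 (he ▸ hii)
      have c2 : cs[i] ≠ '"' := fun he => h2 (he ▸ hii)
      have c3 : cs[i] ≠ '\'' := fun he => h3 (he ▸ hii)
      rw [scanALoop]
      simp only [dif_pos hi]
      rw [if_neg (by tauto), if_neg c1]
      exact ih (i + 1) j (by omega) (by omega) (fun k hk1 hk2 => hb k (by omega) hk2)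
    · rw [scanA_ge (by omega) none, scanA_ge (i := j) (by omega) none]

-- the value of B's two-element min fold
lemma foldMin2 (dq sq gt : Int) :
    [dq, sq].foldl (fun q p => if p ≠ -1 ∧ p < gt ∧ (q = -1 ∨ p < q) then p else q) (-1 : Int)
    = if dq ≠ -1 ∧ dq < gt then (if sq ≠ -1 ∧ sq < gt ∧ sq < dq then sq else dq)
      else (if sq ≠ -1 ∧ sq < gt then sq else -1) := by
  simp only [List.foldl_cons, List.foldl_nil, true_or, and_true]
  split_ifs <;> first | rfl | omega

-- shared argument for 'the first quote character before the first > is at qn':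
-- A skips to qn, enters quote mode there, and the result is decided by the next
-- occurrence of the same quote char, exactly as B's step computes it.
lemma scan_quote_case {cs : List Char} {fuel : Nat}
    (ih : ∀ j : Nat, j ≤ cs.length → cs.length - j ≤ fuel → scanALoop cs j none = scanBLoop cs fuel (j : Int))
    {i qn : Nat} (hf : cs.length - i ≤ fuel + 1)
    {qc : Char} (hqc : qc = '"' ∨ qc = '\'')
    (hiq : i ≤ qn) (hqv : cs[qn]? = some qc)
    (hboring : ∀ k, i ≤ k → k < qn → cs[k]? ≠ some '>' ∧ cs[k]? ≠ some '"' ∧ cs[k]? ≠ some '\'') :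
    scanALoop cs i none =
      (if PySem.Chars.findFrom cs [qc] ((qn : Int) + 1) = -1 then (cs.length : Int)
       else scanBLoop cs fuel (PySem.Chars.findFrom cs [qc] ((qn : Int) + 1) + 1)) := by
  have hqlen : qn < cs.length := (List.getElem?_eq_some_iff.mp hqv).1
  have hqvv : cs[qn] = qc := by
    rw [List.getElem?_eq_getElem hqlen] at hqv; exact Option.some.inj hqv
  have hcast : ((qn : Int) + 1) = (((qn + 1 : Nat) : Nat) : Int) := by push_cast; ring
  rw [hcast]
  have hstep : scanALoop cs i none = scanALoop cs (qn + 1) (some qc) := by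
    rw [scanA_skip (qn - i) i qn rfl hiq hboring, scanALoop]
    simp only [dif_pos hqlen, hqvv]
    rw [if_pos hqc]
  rw [hstep]
  by_cases hcl : PySem.Chars.findFrom cs [qc] ((qn + 1 : Nat) : Int) = -1
  · rw [if_pos hcl]
    exact scanA_quote_noclose (cs.length - (qn + 1)) (qn + 1) rfl (findChar_neg (by omega) hcl)
  · rw [if_neg hcl]
    obtain ⟨hc1, hc2, hc3⟩ := findChar_spec (by omega : qn + 1 ≤ cs.length) hcl
    set cl := PySem.Chars.findFrom cs [qc] (((qn + 1 : Nat) : Nat) : Int) with hcldef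
    clear_value cl
    have hcl0 : 0 ≤ cl := le_trans (by omega) hc1
    have hclq : qn + 1 ≤ cl.toNat := by omega
    have hcllen : cl.toNat < cs.length := (List.getElem?_eq_some_iff.mp hc2).1
    rw [scanA_quote_skip (cl.toNat - (qn + 1)) (qn + 1) cl.toNat rfl hclq hc2 hc3]
    have hcl1 : cl + 1 = (((cl.toNat + 1 : Nat) : Nat) : Int) := by omega
    rw [hcl1]
    exact ih (cl.toNat + 1) (by omega) (by omega)

-- the two loops agree from any position i ≤ len, given enough fuel
lemma scan_main {cs : List Char} : ∀ fuel (i : Nat), i ≤ cs.length → cs.length - i ≤ fuel →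
    scanALoop cs i none = scanBLoop cs fuel (i : Int) := by
  intro fuel
  induction fuel with
  | zero =>
    intro i hi hf
    have h : i = cs.length := by omega
    rw [scanBLoop, h, scanA_ge le_rfl]
  | succ fuel ih =>
    intro i hi hf
    rw [scanBLoop]
    simp only [foldMin2]
    -- generic 'no occurrence of c strictly before its first occurrence from i'
    have before : ∀ (c : Char) (k : Nat), i ≤ k →
        (PySem.Chars.findFrom cs [c] (i : Int) = -1 ∨ (k : Int) < PySem.Chars.findFrom cs [c] (i : Int)) →
        cs[k]? ≠ some c := by
      intro c k hk h
      rcases h with h | h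
      · exact findChar_neg hi h k hk
      · have hne : PySem.Chars.findFrom cs [c] (i : Int) ≠ -1 := by
          intro hc; rw [hc] at h; omega
        refine (findChar_spec hi hne).2.2 k hk ?_
        have := (findChar_spec hi hne).1
        omega
    by_cases hgt1 : PySem.Chars.findFrom cs ['>'] (i : Int) = -1
    · rw [if_pos hgt1]
      exact scanA_noGT (cs.length - i) i rfl (findChar_neg hi hgt1) none
    · rw [if_neg hgt1]
      obtain ⟨hgt2, hgt3, hgt4⟩ := findChar_spec hi hgt1
      set gt := PySem.Chars.findFrom cs ['>'] (i : Int) with hgtdef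
      clear_value gt
      have hgt0 : 0 ≤ gt := le_trans (by omega) hgt2
      have hgtlen : gt.toNat < cs.length := (List.getElem?_eq_some_iff.mp hgt3).1
      set dq := PySem.Chars.findFrom cs ['"'] (i : Int) with hdqdef
      clear_value dq
      set sq := PySem.Chars.findFrom cs ['\''] (i : Int) with hsqdef
      clear_value sq
      by_cases hPd : dq ≠ -1 ∧ dq < gt
      · rw [if_pos hPd]
        have hPd' : PySem.Chars.findFrom cs ['"'] (i : Int) ≠ -1 := by
          rw [← hdqdef]; exact hPd.1
        obtain ⟨hd1, hd2, hd3⟩ := findChar_spec hi hPd'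
        rw [← hdqdef] at hd1 hd2 hd3
        have hdq0 : 0 ≤ dq := le_trans (by omega) hd1
        by_cases hPs : sq ≠ -1 ∧ sq < gt ∧ sq < dq
        · -- q = sq, a single quote comes first
          rw [if_pos hPs]
          have hPs' : PySem.Chars.findFrom cs ['\''] (i : Int) ≠ -1 := by
            rw [← hsqdef]; exact hPs.1
          obtain ⟨hs1, hs2, hs3⟩ := findChar_spec hi hPs'
          rw [← hsqdef] at hs1 hs2 hs3
          have hsq0 : 0 ≤ sq := le_trans (by omega) hs1
          rw [if_neg (by omega : ¬ sq = -1)]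
          rw [PySem.List.pyGetD_eq_getElem cs ' ' hsq0 (by omega)]
          have hsv : cs[sq.toNat] = '\'' := by
            rw [List.getElem?_eq_getElem (by omega : sq.toNat < cs.length)] at hs2
            exact Option.some.inj hs2
          rw [hsv]
          have hsqcast : sq = ((sq.toNat : Nat) : Int) := by omega
          rw [hsqcast]
          refine scan_quote_case ih hf (Or.inr rfl) (by omega) hs2 ?_
          intro k hk1 hk2
          refine ⟨hgt4 k hk1 (by omega), ?_, hs3 k hk1 (by omega)⟩
          refine before '"' k hk1 ?_
          rw [← hdqdef]
          right; omega
        · -- q = dq, a double quote comes first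
          rw [if_neg hPs]
          rw [if_neg (by omega : ¬ dq = -1)]
          rw [PySem.List.pyGetD_eq_getElem cs ' ' hdq0 (by omega)]
          have hdv : cs[dq.toNat] = '"' := by
            rw [List.getElem?_eq_getElem (by omega : dq.toNat < cs.length)] at hd2
            exact Option.some.inj hd2
          rw [hdv]
          have hdqcast : dq = ((dq.toNat : Nat) : Int) := by omega
          rw [hdqcast]
          refine scan_quote_case ih hf (Or.inl rfl) (by omega) hd2 ?_
          intro k hk1 hk2
          refine ⟨hgt4 k hk1 (by omega), hd3 k hk1 (by omega), ?_⟩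
          refine before '\'' k hk1 ?_
          rw [← hsqdef]
          by_cases hs : sq = -1
          · exact Or.inl hs
          · right
            have h2 := hPd.2
            omega
      · rw [if_neg hPd]
        by_cases hPs : sq ≠ -1 ∧ sq < gt
        · -- q = sq (no valid double quote before >)
          rw [if_pos hPs]
          have hPs' : PySem.Chars.findFrom cs ['\''] (i : Int) ≠ -1 := by
            rw [← hsqdef]; exact hPs.1
          obtain ⟨hs1, hs2, hs3⟩ := findChar_spec hi hPs'
          rw [← hsqdef] at hs1 hs2 hs3
          have hsq0 : 0 ≤ sq := le_trans (by omega) hs1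
          rw [if_neg (by omega : ¬ sq = -1)]
          rw [PySem.List.pyGetD_eq_getElem cs ' ' hsq0 (by omega)]
          have hsv : cs[sq.toNat] = '\'' := by
            rw [List.getElem?_eq_getElem (by omega : sq.toNat < cs.length)] at hs2
            exact Option.some.inj hs2
          rw [hsv]
          have hsqcast : sq = ((sq.toNat : Nat) : Int) := by omega
          rw [hsqcast]
          refine scan_quote_case ih hf (Or.inr rfl) (by omega) hs2 ?_
          intro k hk1 hk2
          refine ⟨hgt4 k hk1 (by omega), ?_, hs3 k hk1 (by omega)⟩
          refine before '"' k hk1 ?_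
          rw [← hdqdef]
          by_cases hd : dq = -1
          · exact Or.inl hd
          · right
            have h2 := hPs.2
            omega
        · -- q = -1: no quote before the first '>', A returns gt + 1
          rw [if_neg hPs, if_pos rfl]
          have hnoq : ∀ k, i ≤ k → k < gt.toNat →
              cs[k]? ≠ some '>' ∧ cs[k]? ≠ some '"' ∧ cs[k]? ≠ some '\'' := by
            intro k hk1 hk2
            refine ⟨hgt4 k hk1 hk2, ?_, ?_⟩
            · refine before '"' k hk1 ?_
              rw [← hdqdef]
              by_cases hd : dq = -1
              · exact Or.inl hd
              · right; omega
            · refine before '\'' k hk1 ?_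
              rw [← hsqdef]
              by_cases hs : sq = -1
              · exact Or.inl hs
              · right; omega
          rw [scanA_skip (gt.toNat - i) i gt.toNat rfl (by omega) hnoq, scanALoop]
          have hv : cs[gt.toNat] = '>' := by
            rw [List.getElem?_eq_getElem hgtlen] at hgt3
            exact Option.some.inj hgt3
          simp only [dif_pos hgtlen, hv]
          rw [if_neg (by decide), if_pos trivial]
          omega

-- ===== VERDICT (by name: the statement is the Claim_ definition above) =====
theorem scan_tag_end_py_spec : Claim_equal_scan_tag_end_py := by
  intro s start _ hpre
  obtain ⟨h0, hget⟩ := hpre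
  unfold Spec_scan_tag_end_py scan_tag_end_py scan_tag_end_py_alt
  have hcast : start = ((start.toNat : Nat) : Int) := by omega
  rw [hcast] at hget
  have hget' : s.toList[start.toNat]? = some '<' := by
    have h1 : PySem.Str.pyGet? s ((start.toNat : Nat) : Int) = PySem.List.pyGet? s.toList ((start.toNat : Nat) : Int) := rfl
    rw [h1, PySem.List.pyGet?_natCast] at hget
    exact hget
  have hlt : start.toNat < s.toList.length := (List.getElem?_eq_some_iff.mp hget').1
  have hidx : start + 1 = (((start.toNat + 1 : Nat) : Nat) : Int) := by omega
  rw [hidx, scanALoopI_eq (s.toList.length - (start.toNat + 1)) (start.toNat + 1) none rfl]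
  exact scan_main (s.toList.length + 1) (start.toNat + 1) (by omega) (by omega)
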